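-- pv_equiv track=rewrite | github.com/yilmazakdal/Python-Katas | src/fill_square/fill_square.py | fill_square
-- ===== SOURCE A (Python) =====
-- def fill_square(list):
--     for component in list:
--         if len(component) > len(list):
--             list.append([None])
--             fill_square(list)
--         if len(component) != len(list):
--             component.append(None)
--             fill_square(list)
--     return list
-- ===== SOURCE B (Python) =====
-- def fill_square(list):
--     n = max(len(list), max((len(row) for row in list), default=0))
--     for row in list:
--         row.extend([None] * (n - len(row)))
--     list.extend([None] * n for _ in range(n - len(list)))
--     return list
-- ===== Notes on version B (the rewrite author's own statement) =====
-- stated objective: simpler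
-- what changed: Replaces A's restart-from-scratch recursion (a full recursive call after every single appended cell or row) with a direct construction: compute the target size n = max(#rows, longest row) once, pad each row to n, then append the missing all-None rows.
import Mathlib
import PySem

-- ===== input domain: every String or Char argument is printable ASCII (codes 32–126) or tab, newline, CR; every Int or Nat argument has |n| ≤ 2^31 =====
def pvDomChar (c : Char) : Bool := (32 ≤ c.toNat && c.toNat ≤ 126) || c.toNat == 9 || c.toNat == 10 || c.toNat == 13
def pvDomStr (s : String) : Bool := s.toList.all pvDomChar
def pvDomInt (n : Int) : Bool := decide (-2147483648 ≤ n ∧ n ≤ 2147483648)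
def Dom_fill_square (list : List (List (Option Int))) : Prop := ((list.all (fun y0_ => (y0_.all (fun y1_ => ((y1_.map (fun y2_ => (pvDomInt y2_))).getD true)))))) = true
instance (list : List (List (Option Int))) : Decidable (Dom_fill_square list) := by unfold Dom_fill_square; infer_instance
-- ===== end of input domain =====

-- B replaces A's restart-from-scratch recursion by a direct construction (simpler): compute the
-- target size n once, pad every row to n, append the missing all-None rows.  Both the Python A
-- and the Python B mutate their argument in place; the equivalence proved here is about the
-- returned value (which, for both, is the final state of that list).

-- ===== PORT A =====
-- A mutates `list` while a `for` loop walks it by index and restarts itself recursively after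
-- each single mutation.  The port threads the list value through an index loop; `fuel` is only
-- a totality guard (it decrements once per loop iteration and once per recursive frame entry,
-- and pvFuelA is proven sufficient below), every step is A's step.
def pvMaxRowA (l : List (List (Option Int))) : Nat :=
  l.foldr (fun r m => max r.length m) 0

def pvNA (l : List (List (Option Int))) : Nat := max l.length (pvMaxRowA l)

def pvCellsA (l : List (List (Option Int))) : Nat :=
  l.foldr (fun r s => r.length + s) 0

def pvMuA (l : List (List (Option Int))) : Nat :=
  (pvNA l * pvNA l + pvNA l) - (pvCellsA l + l.length)

def pvFuelA (l : List (List (Option Int))) : Nat := (pvMuA l + 1) * (pvNA l + 2)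

def pvLoopA : Nat → Nat → List (List (Option Int)) → List (List (Option Int))
  | 0, _, l => l
  | f + 1, i, l =>
    if i < l.length then
      -- component = list[i]
      let c := l.getD i []
      -- if len(component) > len(list): list.append([None]); fill_square(list)
      let l1 := if l.length < c.length then pvLoopA f 0 (l ++ [[none]]) else l
      -- component is the object list[i] (rows are only ever mutated in place, never replaced)
      let c1 := l1.getD i []
      -- if len(component) != len(list): component.append(None); fill_square(list)
      let l2 := if c1.length ≠ l1.length then pvLoopA f 0 (l1.set i (c1 ++ [none])) else l1
      pvLoopA f (i + 1) l2
    else l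

def fill_square (list : List (List (Option Int))) : List (List (Option Int)) :=
  pvLoopA (pvFuelA list) 0 list

-- ===== PORT B =====
def fill_square_alt (list : List (List (Option Int))) : List (List (Option Int)) :=
  let n := max list.length (list.foldr (fun r m => max r.length m) 0)
  (list.map (fun r => r ++ List.replicate (n - r.length) none)) ++
    List.replicate (n - list.length) (List.replicate n none)

-- ===== PRECONDITION & SPEC =====
def Spec_fill_square (list : List (List (Option Int))) (out : List (List (Option Int))) : Prop := out = fill_square_alt list
instance (list : List (List (Option Int))) (out : List (List (Option Int))) : Decidable (Spec_fill_square list out) := by unfold Spec_fill_square; infer_instance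

-- ===== CLAIM (what is proved, stated in full; the proofs are below) =====
def Claim_equal_fill_square : Prop := ∀ (list : List (List (Option Int))), Dom_fill_square list → Spec_fill_square list (fill_square list)

-- ===== LEMMAS AND PROOFS =====

lemma le_pvMaxRowA {l : List (List (Option Int))} {r : List (Option Int)}
    (h : r ∈ l) : r.length ≤ pvMaxRowA l := by
  induction l with
  | nil => cases h
  | cons a t ih =>
    rcases List.mem_cons.1 h with rfl | h
    · simp only [pvMaxRowA, List.foldr]; omega
    · have := ih h
      simp only [pvMaxRowA, List.foldr] at *
      omega

lemma pvMaxRowA_le {l : List (List (Option Int))} {k : Nat}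
    (h : ∀ r ∈ l, r.length ≤ k) : pvMaxRowA l ≤ k := by
  induction l with
  | nil => simp [pvMaxRowA]
  | cons a t ih =>
    have h1 := h a (by simp)
    have h2 := ih (fun r hr => h r (by simp [hr]))
    simp only [pvMaxRowA, List.foldr] at *
    omega

lemma pvMaxRowA_set_ge : ∀ (l : List (List (Option Int))) (i : Nat) (c' : List (Option Int)),
    (l.getD i []).length ≤ c'.length → pvMaxRowA l ≤ pvMaxRowA (l.set i c') := by
  intro l
  induction l with
  | nil => intro i c' _; simp
  | cons a t ih =>
    intro i c' h
    cases i with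
    | zero =>
      simp only [List.getD_cons_zero] at h
      simp only [List.set, pvMaxRowA, List.foldr]
      omega
    | succ j =>
      simp only [List.getD_cons_succ] at h
      have := ih j c' h
      simp only [List.set, pvMaxRowA, List.foldr] at *
      omega

lemma pvCellsA_le {l : List (List (Option Int))} {k : Nat}
    (h : ∀ r ∈ l, r.length ≤ k) : pvCellsA l ≤ l.length * k := by
  induction l with
  | nil => simp [pvCellsA]
  | cons a t ih =>
    have ha := h a (by simp)
    have ht := ih (fun r hr => h r (by simp [hr]))
    simp only [pvCellsA, List.foldr, List.length_cons, Nat.succ_mul] at *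
    omega

lemma pvCellsA_append_one (l : List (List (Option Int))) :
    pvCellsA (l ++ [[none]]) = pvCellsA l + 1 := by
  induction l with
  | nil => simp [pvCellsA]
  | cons a t ih => simp only [pvCellsA, List.foldr, List.cons_append] at *; omega

lemma pvCellsA_set : ∀ (l : List (List (Option Int))) (i : Nat), i < l.length →
    pvCellsA (l.set i ((l.getD i []) ++ [none])) = pvCellsA l + 1 := by
  intro l
  induction l with
  | nil => intro i h; simp at h
  | cons a t ih =>
    intro i h
    cases i with
    | zero => simp [pvCellsA]; omega
    | succ j =>
      simp only [List.length_cons] at h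
      have := ih j (by omega)
      simp only [List.set, List.getD_cons_succ, pvCellsA, List.foldr] at *
      omega

lemma pvMaxRowA_append_one (l : List (List (Option Int))) :
    pvMaxRowA (l ++ [[none]]) = max (pvMaxRowA l) 1 := by
  induction l with
  | nil => simp [pvMaxRowA]
  | cons a t ih => simp only [pvMaxRowA, List.foldr, List.cons_append] at *; omega

lemma pvNA_append (l : List (List (Option Int))) (h : l.length < pvNA l) :
    pvNA (l ++ [[none]]) = pvNA l := by
  have hm : pvMaxRowA (l ++ [[none]]) = max (pvMaxRowA l) 1 := pvMaxRowA_append_one l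
  simp only [pvNA, List.length_append, List.length_cons, List.length_nil] at *
  omega

lemma pvNA_set (l : List (List (Option Int))) (i : Nat) (hi : i < l.length)
    (hlt : (l.getD i []).length < l.length) :
    pvNA (l.set i ((l.getD i []) ++ [none])) = pvNA l := by
  have h1 : pvMaxRowA l ≤ pvMaxRowA (l.set i ((l.getD i []) ++ [none])) :=
    pvMaxRowA_set_ge l i _ (by simp)
  have h2 : pvMaxRowA (l.set i ((l.getD i []) ++ [none])) ≤ pvNA l := by
    apply pvMaxRowA_le
    intro r hr
    rcases List.mem_or_eq_of_mem_set hr with h | h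
    · exact le_trans (le_pvMaxRowA h) (le_max_right _ _)
    · subst h
      simp only [List.length_append, List.length_cons, List.length_nil]
      have : l.length ≤ pvNA l := le_max_left _ _
      omega
  simp only [pvNA, List.length_set] at *
  omega

lemma pvMuA_append (l : List (List (Option Int))) (h : l.length < pvNA l) :
    pvMuA (l ++ [[none]]) < pvMuA l := by
  have hn := pvNA_append l h
  have hc := pvCellsA_append_one l
  have hcl : pvCellsA l ≤ l.length * pvNA l :=
    pvCellsA_le (fun r hr => le_trans (le_pvMaxRowA hr) (le_max_right _ _))
  have hml : (l.length + 1) * pvNA l ≤ pvNA l * pvNA l :=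
    Nat.mul_le_mul_right _ (by omega)
  have hsm : (l.length + 1) * pvNA l = l.length * pvNA l + pvNA l := by ring
  simp only [pvMuA, hn, hc, List.length_append, List.length_cons, List.length_nil]
  generalize l.length * pvNA l = P at *
  generalize pvNA l * pvNA l = Q at *
  omega

lemma pvMuA_set (l : List (List (Option Int))) (i : Nat) (hi : i < l.length)
    (hlt : (l.getD i []).length < l.length) :
    pvMuA (l.set i ((l.getD i []) ++ [none])) < pvMuA l := by
  have hn := pvNA_set l i hi hlt
  have hc := pvCellsA_set l i hi
  have hln : l.length ≤ pvNA l := le_max_left _ _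
  have hcl : pvCellsA (l.set i ((l.getD i []) ++ [none])) ≤ l.length * pvNA l := by
    have hb : ∀ r ∈ l.set i ((l.getD i []) ++ [none]), r.length ≤ pvNA l := by
      intro r hr
      rcases List.mem_or_eq_of_mem_set hr with h | h
      · exact le_trans (le_pvMaxRowA h) (le_max_right _ _)
      · subst h
        simp only [List.length_append, List.length_cons, List.length_nil]
        omega
    have := pvCellsA_le hb
    simpa [List.length_set] using this
  have hml : l.length * pvNA l ≤ pvNA l * pvNA l := Nat.mul_le_mul_right _ hln
  simp only [pvMuA, hn, hc, List.length_set] at *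
  generalize l.length * pvNA l = P at *
  generalize pvNA l * pvNA l = Q at *
  omega

lemma alt_eq (l : List (List (Option Int))) :
    fill_square_alt l =
      (l.map (fun r => r ++ List.replicate (pvNA l - r.length) none)) ++
        List.replicate (pvNA l - l.length) (List.replicate (pvNA l) none) := rfl

lemma alt_rows {l : List (List (Option Int))} {r : List (Option Int)}
    (h : r ∈ fill_square_alt l) : r.length = pvNA l := by
  rw [alt_eq] at h
  rcases List.mem_append.1 h with h | h
  · rcases List.mem_map.1 h with ⟨s, hs, rfl⟩
    have h1 : s.length ≤ pvNA l := le_trans (le_pvMaxRowA hs) (le_max_right _ _)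
    simp only [List.length_append, List.length_replicate]
    omega
  · rw [List.eq_of_mem_replicate h]; simp

lemma alt_length (l : List (List (Option Int))) :
    (fill_square_alt l).length = pvNA l := by
  have : l.length ≤ pvNA l := le_max_left _ _
  rw [alt_eq]
  simp only [List.length_append, List.length_map, List.length_replicate]
  omega

lemma alt_square_fix {l : List (List (Option Int))}
    (h : ∀ r ∈ l, r.length = l.length) : fill_square_alt l = l := by
  have hm : pvMaxRowA l ≤ l.length := pvMaxRowA_le (fun r hr => le_of_eq (h r hr))
  have hn : pvNA l = l.length := by simp only [pvNA]; omega
  rw [alt_eq, hn]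
  have hmap : (l.map (fun r => r ++ List.replicate (l.length - r.length) none)) = l := by
    rw [List.map_congr_left (g := fun r => r)
      (fun r hr => by rw [h r hr]; simp), List.map_id']
  rw [hmap]
  simp

lemma alt_sq {l : List (List (Option Int))} {r : List (Option Int)}
    (h : r ∈ fill_square_alt l) : r.length = (fill_square_alt l).length := by
  rw [alt_rows h, alt_length]

lemma alt_append (l : List (List (Option Int))) (h : l.length < pvNA l) :
    fill_square_alt (l ++ [[none]]) = fill_square_alt l := by
  have hn := pvNA_append l h
  rw [alt_eq, alt_eq, hn]
  simp only [List.map_append, List.map_cons, List.map_nil, List.length_append,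
    List.length_cons, List.length_nil]
  have h1 : [(none : Option Int)] ++ List.replicate (pvNA l - 1) none
      = List.replicate (pvNA l) none := by
    have hx : pvNA l = (pvNA l - 1) + 1 := by omega
    rw [hx]
    simp [List.replicate_succ]
  have h2 : pvNA l - l.length = (pvNA l - (l.length + 1)) + 1 := by omega
  rw [List.append_assoc]
  congr 1
  rw [h2, List.replicate_succ]
  rw [← h1]
  simp

lemma alt_set (l : List (List (Option Int))) (i : Nat) (hi : i < l.length)
    (hlt : (l.getD i []).length < l.length) :
    fill_square_alt (l.set i ((l.getD i []) ++ [none])) = fill_square_alt l := by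
  have hn := pvNA_set l i hi hlt
  have hln : l.length ≤ pvNA l := le_max_left _ _
  rw [alt_eq, alt_eq, hn]
  simp only [List.length_set]
  congr 1
  rw [List.map_set]
  have hfc : ((l.getD i []) ++ [none]) ++ List.replicate (pvNA l - ((l.getD i []) ++ [none]).length) none
      = (l.getD i []) ++ List.replicate (pvNA l - (l.getD i []).length) none := by
    simp only [List.length_append, List.length_cons, List.length_nil, List.append_assoc]
    congr 1
    have h2 : pvNA l - (l.getD i []).length = (pvNA l - ((l.getD i []).length + 1)) + 1 := by omega
    rw [h2, List.replicate_succ]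
    simp
  rw [hfc]
  have hmi : i < (l.map (fun r => r ++ List.replicate (pvNA l - r.length) none)).length := by
    simpa using hi
  have hg : (l.map (fun r => r ++ List.replicate (pvNA l - r.length) none)).getD i []
      = (l.getD i []) ++ List.replicate (pvNA l - (l.getD i []).length) none := by
    rw [List.getD_eq_getElem _ _ hmi, List.getElem_map, List.getD_eq_getElem _ _ hi]
  rw [← hg, List.getD_eq_getElem _ _ hmi, List.set_getElem_self]

lemma loop_fix {l : List (List (Option Int))}
    (h : ∀ r ∈ l, r.length = l.length) : ∀ f i, pvLoopA f i l = l := by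
  intro f
  induction f with
  | zero => intro i; rfl
  | succ f ih =>
    intro i
    by_cases hi : i < l.length
    · have hmem : l.getD i [] ∈ l := by
        rw [List.getD_eq_getElem l [] hi]; exact List.getElem_mem hi
      have hc := h _ hmem
      simp only [pvLoopA, if_pos hi]
      rw [if_neg (show ¬l.length < (l.getD i []).length by omega)]
      rw [if_neg (show ¬(l.getD i []).length ≠ l.length by omega)]
      exact ih (i + 1)
    · simp only [pvLoopA, if_neg hi]

lemma pvFuelStep {a b n f i : Nat} (h : (a + 1) * (n + 2) ≤ f + 1 + i) (hi : i ≤ n)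
    (hab : b < a) : (b + 1) * (n + 2) ≤ f := by
  have h2 : (b + 1) * (n + 2) + (n + 2) ≤ (a + 1) * (n + 2) := by
    have h3 : (b + 2) * (n + 2) ≤ (a + 1) * (n + 2) :=
      Nat.mul_le_mul_right _ (by omega)
    have h4 : (b + 1) * (n + 2) + (n + 2) = (b + 2) * (n + 2) := by ring
    omega
  have h5 := le_trans h2 h
  generalize (b + 1) * (n + 2) = X at h5 ⊢
  omega

lemma square_of_prefix {l : List (List (Option Int))} {i : Nat} (hi : l.length ≤ i)
    (hpre : ∀ j, j < i → j < l.length → (l.getD j []).length = l.length) :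
    ∀ r ∈ l, r.length = l.length := by
  intro r hr
  obtain ⟨j, hj, rfl⟩ := List.mem_iff_getElem.1 hr
  have := hpre j (by omega) hj
  rwa [List.getD_eq_getElem l [] hj] at this

lemma main_loop : ∀ (f : Nat) (l : List (List (Option Int))) (i : Nat),
    (pvMuA l + 1) * (pvNA l + 2) ≤ f + i →
    (∀ j, j < i → j < l.length → (l.getD j []).length = l.length) →
    pvLoopA f i l = fill_square_alt l := by
  intro f
  induction f with
  | zero =>
    intro l i hf hpre
    have hln : l.length ≤ pvNA l := le_max_left _ _
    have hge : pvNA l + 2 ≤ (pvMuA l + 1) * (pvNA l + 2) :=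
      Nat.le_mul_of_pos_left _ (by omega)
    have hi : l.length ≤ i := by
      have := le_trans hge hf
      omega
    exact (alt_square_fix (square_of_prefix hi hpre)).symm
  | succ f ih =>
    intro l i hf hpre
    by_cases hi : i < l.length
    · have hln : l.length ≤ pvNA l := le_max_left _ _
      have hcm : l.getD i [] ∈ l := by
        rw [List.getD_eq_getElem l [] hi]; exact List.getElem_mem hi
      have hcn : (l.getD i []).length ≤ pvNA l :=
        le_trans (le_pvMaxRowA hcm) (le_max_right _ _)
      rcases lt_trichotomy (l.getD i []).length l.length with hlt | heq | hgt
      · -- row i shorter than the list: component.append(None), then restart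
        have hrec : pvLoopA f 0 (l.set i ((l.getD i []) ++ [none])) = fill_square_alt l := by
          rw [← alt_set l i hi hlt]
          apply ih
          · rw [pvNA_set l i hi hlt]
            exact le_trans (pvFuelStep hf (by omega) (pvMuA_set l i hi hlt)) (by omega)
          · intro j hj _; omega
        simp only [pvLoopA, if_pos hi]
        rw [if_neg (show ¬l.length < (l.getD i []).length by omega)]
        rw [if_pos (show (l.getD i []).length ≠ l.length by omega), hrec]
        exact loop_fix (fun r hr => alt_sq hr) f (i + 1)
      · -- row i already the right length: just advance
        simp only [pvLoopA, if_pos hi]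
        rw [if_neg (show ¬l.length < (l.getD i []).length by omega)]
        rw [if_neg (show ¬(l.getD i []).length ≠ l.length by omega)]
        apply ih
        · omega
        · intro j hj hjl
          rcases Nat.lt_succ_iff_lt_or_eq.1 hj with hj' | rfl
          · exact hpre j hj' hjl
          · exact heq
      · -- row i longer than the list: list.append([None]), then restart
        have hlen : l.length < pvNA l := by omega
        have hrec : pvLoopA f 0 (l ++ [[none]]) = fill_square_alt l := by
          rw [← alt_append l hlen]
          apply ih
          · rw [pvNA_append l hlen]
            exact le_trans (pvFuelStep hf (by omega) (pvMuA_append l hlen)) (by omega)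
          · intro j hj _; omega
        have hgl : i < (fill_square_alt l).length := by rw [alt_length]; omega
        have hgm : (fill_square_alt l).getD i [] ∈ fill_square_alt l := by
          rw [List.getD_eq_getElem _ [] hgl]; exact List.getElem_mem hgl
        have hgc : ((fill_square_alt l).getD i []).length = (fill_square_alt l).length :=
          alt_sq hgm
        have h1 : (if l.length < (l.getD i []).length then pvLoopA f 0 (l ++ [[none]]) else l)
            = fill_square_alt l := by rw [if_pos (by omega), hrec]
        simp only [pvLoopA, if_pos hi]
        rw [h1]
        rw [if_neg (show ¬((fill_square_alt l).getD i []).length ≠ (fill_square_alt l).length by omega)]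
        exact loop_fix (fun r hr => alt_sq hr) f (i + 1)
    · have hsq := square_of_prefix (le_of_not_gt hi) (fun j _ hjl => hpre j (by omega) hjl)
      simp only [pvLoopA, if_neg hi]
      exact (alt_square_fix hsq).symm

-- ===== VERDICT (by name: the statement is the Claim_ definition above) =====
theorem fill_square_spec : Claim_equal_fill_square := by
  intro l _
  unfold Spec_fill_square fill_square
  exact main_loop (pvFuelA l) l 0 (by simp [pvFuelA]) (by omega)
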